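-- pv_equiv track=rewrite | github.com/1possible/2bepi_othello | AIStrat.py | coup
-- ===== SOURCE A (Python) =====
-- def coup(case, direction, board, point =0):
--     # fonction récursive qui cherche s'il y a un move possible avec le pion sur la CASE et dans la DIRECTION
--     # (qui est en parametre)
--     #Parametre:
--     #   case        : int compris entre 0 et 63 inclus: case du pion que l'on veut regarder
--     #   direction   : direction par rapport à la CASE du pion que l'on va vérifier pour voir si il y a un move
--     #                 tuple avec comme premier élément -1,0,1 qui fait reference à la colonne
--     #                                  deuxieme élément -1,0,1 qui fait référence à la ligne
--     #   board       : l'etat du plateau sour forme de list à 2 éléments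
--     #                       board[0] :liste qui contient les cases de ses pieces
--     #                       board[1] : liste qui contient les cases des piece de son adversaire
--     #   point       : Int: nombre de point aquis par le mouvement (sert lors de la recusivité)
--     #Return:
--     #   si il y a pas de move possible dans la direction renvoie None
--     #   sinon renvoie le move sont sous forme de liste à 2 élément
--     #                le element 0: int :la case du move
--     #                le element 1: int :le nombre de piece prise avec ce move
--     caseRech = (caseDacote(case,direction))
--     if caseRech is None:
--         return None, None
--     elif(caseRech in board[1]):
--         return coup(caseRech,direction, board, point+1)
--     elif(caseRech in board[0]):
--         return None, None
--     else:
--         if point == 0 :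
--             return None, None
--         else:
--             return caseRech, point
--
-- def caseDacote(case, direction):
--     # revoie la case qui se trouve à coté dans la DIRECTION
--     # Parametre:
--     #   case        : int compris entre 0 et 63 inclus: case de référence
--     #   direction   : tuple avec comme premier élément -1,0,1 qui fait reference à la colonne
--     #                                  deuxiemme élément -1,0,1 qui fait référence à la ligne
--     #Return:
--     #   si la case demande se trouve en dehors des limite du plateau
--     #       None
--     #   sinon
--     #       int: numeros de la case à coté de la case(en paramètre) dans la direction donnée
--     c = case%8
--     l = case//8
--     if ((c == 0 and direction[0]==-1) or (c==7 and direction[0] == 1)):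
--         return None
--     elif ((l == 0 and direction[1]==-1) or (l==7 and direction[1] == 1)):
--         return None
--     else :
--         return (l + direction[1])*8 + c+direction[0]
-- ===== SOURCE B (Python) =====
-- def coup(case, direction, board, point=0):
--     # Iterative rewrite: walk the ray with a while-loop, computing the next
--     # cell arithmetically (next = cur + 8*dl + dc) after the border checks,
--     # instead of the recursive helper-based version.
--     dc, dl = direction
--     mine = board[0]
--     theirs = board[1]
--     cur = case
--     captured = point
--     while True:
--         c = cur % 8
--         l = cur // 8
--         if (c == 0 and dc == -1) or (c == 7 and dc == 1) or \
--            (l == 0 and dl == -1) or (l == 7 and dl == 1):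
--             return None, None
--         nxt = cur + 8 * dl + dc
--         if nxt in theirs:
--             cur = nxt
--             captured += 1
--         elif nxt in mine or captured == 0:
--             return None, None
--         else:
--             return nxt, captured
-- ===== Notes on version B (the rewrite author's own statement) =====
-- stated objective: alternative
-- what changed: Replaced the tail recursion through the caseDacote helper by a single while-loop that keeps (cur, captured) locals, does the four border tests inline and computes the neighbouring cell arithmetically as cur + 8*dl + dc, merging the own-piece and zero-capture failure branches.
-- outside the precondition, e.g. on coup(0, (-1, 0), [], 0): A returns (None, None), B raises IndexError
import Mathlib
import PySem

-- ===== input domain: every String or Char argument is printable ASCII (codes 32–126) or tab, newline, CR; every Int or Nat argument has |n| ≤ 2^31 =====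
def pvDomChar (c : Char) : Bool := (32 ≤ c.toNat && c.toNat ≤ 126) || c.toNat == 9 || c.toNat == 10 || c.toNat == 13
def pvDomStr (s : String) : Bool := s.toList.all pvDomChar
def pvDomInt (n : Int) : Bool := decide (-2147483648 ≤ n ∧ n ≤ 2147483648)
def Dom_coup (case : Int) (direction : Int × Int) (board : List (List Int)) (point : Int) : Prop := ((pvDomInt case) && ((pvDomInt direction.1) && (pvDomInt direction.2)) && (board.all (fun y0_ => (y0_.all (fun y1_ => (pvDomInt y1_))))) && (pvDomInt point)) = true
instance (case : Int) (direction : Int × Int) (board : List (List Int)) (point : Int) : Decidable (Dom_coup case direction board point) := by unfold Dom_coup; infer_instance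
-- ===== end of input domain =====

-- B replaces A's tail recursion through the caseDacote helper by a single while-loop with
-- (cur, captured) locals, inline border tests and an arithmetic next cell (cur + 8*dl + dc).
-- A mutates nothing; equivalence is about the return value.

-- ===== PORT A =====
-- helper caseDacote, transliterated
def caseDacote (case : Int) (direction : Int × Int) : Option Int :=
  let c := PySem.Int.mod case 8
  let l := PySem.Int.floordiv case 8
  if (c = 0 ∧ direction.1 = -1) ∨ (c = 7 ∧ direction.1 = 1) then none
  else if (l = 0 ∧ direction.2 = -1) ∨ (l = 7 ∧ direction.2 = 1) then none
  else some ((l + direction.2) * 8 + c + direction.1)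

-- A's recursion, with fuel only to make it total in Lean (inside Pre_ the fuel never runs out:
-- each recursive step lands on a fresh element of board[1], so |board[1]|+1 steps suffice).
def coupFuel (fuel : Nat) (case : Int) (direction : Int × Int) (board : List (List Int)) (point : Int) : Option Int × Option Int :=
  match fuel with
  | 0 => (none, none)
  | fuel + 1 =>
    match caseDacote case direction with
    | none => (none, none)
    | some caseRech =>
      if caseRech ∈ (PySem.List.pyGet? board 1).getD [] then
        coupFuel fuel caseRech direction board (point + 1)
      else if caseRech ∈ (PySem.List.pyGet? board 0).getD [] then (none, none)
      else if point = 0 then (none, none)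
      else (some caseRech, some point)

def coup (case : Int) (direction : Int × Int) (board : List (List Int)) (point : Int) : Option Int × Option Int :=
  coupFuel (((PySem.List.pyGet? board 1).getD []).length + 1) case direction board point

-- ===== PORT B =====
-- B's while-loop, with the same fuel bound making it total in Lean
def coupAltLoop (fuel : Nat) (dc dl : Int) (mine theirs : List Int) (cur captured : Int) : Option Int × Option Int :=
  match fuel with
  | 0 => (none, none)
  | fuel + 1 =>
    let c := PySem.Int.mod cur 8
    let l := PySem.Int.floordiv cur 8
    if (c = 0 ∧ dc = -1) ∨ (c = 7 ∧ dc = 1) ∨ (l = 0 ∧ dl = -1) ∨ (l = 7 ∧ dl = 1) then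
      (none, none)
    else
      let nxt := cur + 8 * dl + dc
      if nxt ∈ theirs then coupAltLoop fuel dc dl mine theirs nxt (captured + 1)
      else if nxt ∈ mine ∨ captured = 0 then (none, none)
      else (some nxt, some captured)

def coup_alt (case : Int) (direction : Int × Int) (board : List (List Int)) (point : Int) : Option Int × Option Int :=
  match board with
  | b0 :: b1 :: _ => coupAltLoop (b1.length + 1) direction.1 direction.2 b0 b1 case point
  | _ => (none, none)

-- ===== PRECONDITION & SPEC =====
-- Pre_ keeps the natural domain: board must carry its two piece lists (otherwise A raises
-- IndexError on every input except when the very first neighbour is already off-board, where it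
-- returns before touching board), and excludes the step direction 8*dl+dc = 0 starting on an
-- opposing piece off the borders, where A exhausts the recursion limit (RecursionError).
def Pre_coup (case : Int) (direction : Int × Int) (board : List (List Int)) (point : Int) : Prop :=
  2 ≤ board.length ∧
  (8 * direction.2 + direction.1 = 0 → case ∈ board.getD 1 [] →
    ((PySem.Int.mod case 8 = 0 ∧ direction.1 = -1) ∨ (PySem.Int.mod case 8 = 7 ∧ direction.1 = 1) ∨
     (PySem.Int.floordiv case 8 = 0 ∧ direction.2 = -1) ∨ (PySem.Int.floordiv case 8 = 7 ∧ direction.2 = 1)))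
instance (case : Int) (direction : Int × Int) (board : List (List Int)) (point : Int) : Decidable (Pre_coup case direction board point) := by unfold Pre_coup; infer_instance

def pvWitness_coup : Int × (Int × Int) × List (List Int) × Int := (28, (1, 1), [[37], [36, 44]], 0)

def Spec_coup (case : Int) (direction : Int × Int) (board : List (List Int)) (point : Int) (out : Option Int × Option Int) : Prop := out = coup_alt case direction board point
instance (case : Int) (direction : Int × Int) (board : List (List Int)) (point : Int) (out : Option Int × Option Int) : Decidable (Spec_coup case direction board point out) := by unfold Spec_coup; infer_instance

-- ===== CLAIM (what is proved, stated in full; the proofs are below) =====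
def Claim_equal_coup : Prop := ∀ (case : Int) (direction : Int × Int) (board : List (List Int)) (point : Int), Dom_coup case direction board point → Pre_coup case direction board point → Spec_coup case direction board point (coup case direction board point)

-- ===== LEMMAS AND PROOFS =====

lemma loop_eq (fuel : Nat) : ∀ (case point dc dl : Int) (b0 b1 : List Int) (rest : List (List Int)),
    coupFuel fuel case (dc, dl) (b0 :: b1 :: rest) point = coupAltLoop fuel dc dl b0 b1 case point := by
  induction fuel with
  | zero => intro _ _ _ _ _ _ _; rfl
  | succ n ih =>
    intro case point dc dl b0 b1 rest
    have hpos : (0 : Int) ≤ rest.length + 1 := by positivity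
    have hget1 : (PySem.List.pyGet? (b0 :: b1 :: rest) 1).getD [] = b1 := by
      simp [PySem.List.pyGet?, PySem.List.pyIdx?]
    have hget0 : (PySem.List.pyGet? (b0 :: b1 :: rest) 0).getD [] = b0 := by
      simp [PySem.List.pyGet?, PySem.List.pyIdx?, hpos]
    have hnxt : (case / 8 + dl) * 8 + case % 8 + dc = case + 8 * dl + dc := by omega
    by_cases h1 : (8 ∣ case ∧ dc = -1) ∨ (case % 8 = 7 ∧ dc = 1)
    · have hb : (8 ∣ case ∧ dc = -1) ∨ (case % 8 = 7 ∧ dc = 1) ∨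
          (case / 8 = 0 ∧ dl = -1) ∨ (case / 8 = 7 ∧ dl = 1) := by tauto
      simp [coupFuel, coupAltLoop, caseDacote, h1, hb]
    · by_cases h2 : (case / 8 = 0 ∧ dl = -1) ∨ (case / 8 = 7 ∧ dl = 1)
      · have hb : (8 ∣ case ∧ dc = -1) ∨ (case % 8 = 7 ∧ dc = 1) ∨
            (case / 8 = 0 ∧ dl = -1) ∨ (case / 8 = 7 ∧ dl = 1) := by tauto
        simp [coupFuel, coupAltLoop, caseDacote, h1, h2, hb]
      · have hb : ¬((8 ∣ case ∧ dc = -1) ∨ (case % 8 = 7 ∧ dc = 1) ∨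
            (case / 8 = 0 ∧ dl = -1) ∨ (case / 8 = 7 ∧ dl = 1)) := by tauto
        by_cases ht : case + 8 * dl + dc ∈ b1
        · simp [coupFuel, coupAltLoop, caseDacote, hget0, hget1, hnxt, h1, h2, hb, ht, ih]
        · by_cases hm : case + 8 * dl + dc ∈ b0
          · simp [coupFuel, coupAltLoop, caseDacote, hget0, hget1, hnxt, h1, h2, hb, ht, hm]
          · by_cases hp : point = 0
            · simp [coupFuel, coupAltLoop, caseDacote, hget0, hget1, hnxt, h1, h2, hb, ht, hm, hp]
            · simp [coupFuel, coupAltLoop, caseDacote, hget0, hget1, hnxt, h1, h2, hb, ht, hm, hp]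

-- ===== VERDICT (by name: the statement is the Claim_ definition above) =====
theorem coup_spec : Claim_equal_coup := by
  intro case direction board point _ hpre
  obtain ⟨hlen, -⟩ := hpre
  match board, hlen with
  | b0 :: b1 :: rest, _ =>
    show coup case direction (b0 :: b1 :: rest) point = coup_alt case direction (b0 :: b1 :: rest) point
    unfold coup coup_alt
    have hget1 : (PySem.List.pyGet? (b0 :: b1 :: rest) 1).getD [] = b1 := by
      simp [PySem.List.pyGet?, PySem.List.pyIdx?]
    rw [hget1]
    obtain ⟨dc, dl⟩ := direction
    exact loop_eq _ case point dc dl b0 b1 rest
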